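-- pv_equiv track=rewrite | github.com/potti-charles/CS61A | Disc01/Hareturtle.py | unique_digit
-- ===== SOURCE A (Python) =====
-- def unique_digit(n):
--     assert n > 0 and isinstance(n, int), "The input must be a positive integer"
--     def has_digit(n, k):
--         while n > 0:
--             if n % 10 == k:
--                 return True
--             n = n // 10
--         return False
--     i = 1
--     u = 0
--     while i < 10:
--         if has_digit(n, i):
--             u += 1
--         i += 1
--     return u
-- ===== SOURCE B (Python) =====
-- def unique_digit(n):
--     assert n > 0 and isinstance(n, int), "The input must be a positive integer"
--     digits = set()
--     while n > 0:
--         digits.add(n % 10)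
--         n //= 10
--     return len(digits - {0})
-- ===== Notes on version B (the rewrite author's own statement) =====
-- stated objective: simpler
-- what changed: Single pass over the digits building a set once, then count the nonzero elements of the set, instead of nine separate digit scans (one per candidate digit 1..9).
import Mathlib
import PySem

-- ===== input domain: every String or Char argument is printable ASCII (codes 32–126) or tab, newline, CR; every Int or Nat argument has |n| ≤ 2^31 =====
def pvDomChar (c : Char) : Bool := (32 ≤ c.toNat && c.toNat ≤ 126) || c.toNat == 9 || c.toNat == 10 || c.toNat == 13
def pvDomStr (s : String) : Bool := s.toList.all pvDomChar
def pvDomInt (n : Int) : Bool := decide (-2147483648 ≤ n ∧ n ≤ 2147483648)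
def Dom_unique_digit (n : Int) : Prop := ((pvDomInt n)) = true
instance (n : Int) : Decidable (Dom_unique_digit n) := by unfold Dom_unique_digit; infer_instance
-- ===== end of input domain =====

-- B builds the digit set in one pass and counts its nonzero elements, instead of A's
-- nine separate digit scans (one per candidate digit 1..9); objective: simpler.

-- ===== PORT A =====
-- inner helper has_digit(n, k)
def hasDigitA (n k : Int) : Bool :=
  if _h : n > 0 then
    if PySem.Int.mod n 10 = k then true
    else hasDigitA (PySem.Int.floordiv n 10) k
  else false
termination_by n.toNat
decreasing_by
  rw [PySem.Int.floordiv_eq_ediv_of_pos (by omega)]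
  omega

-- outer while loop: i = 1; while i < 10: if has_digit(n, i): u += 1; i += 1
def unique_digit (n : Int) : Int :=
  (PySem.List.pyRange 1 10 1).foldl (fun u i => if hasDigitA n i then u + 1 else u) 0

-- ===== PORT B =====
-- while n > 0: digits.add(n % 10); n //= 10
def collectDigits (n : Int) (s : PySem.Set Int) : PySem.Set Int :=
  if _h : n > 0 then
    collectDigits (PySem.Int.floordiv n 10) (PySem.Set.add s (PySem.Int.mod n 10))
  else s
termination_by n.toNat
decreasing_by
  rw [PySem.Int.floordiv_eq_ediv_of_pos (by omega)]
  omega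

-- return len(digits - {0})
def unique_digit_alt (n : Int) : Int :=
  PySem.Set.len (PySem.Set.diff (collectDigits n PySem.Set.empty) (PySem.Set.ofList [(0 : Int)]))

-- ===== PRECONDITION & SPEC =====
-- A (and B) assert n > 0; on n ≤ 0 both raise AssertionError, so those inputs are excluded.
def Pre_unique_digit (n : Int) : Prop := 0 < n
instance (n : Int) : Decidable (Pre_unique_digit n) := by unfold Pre_unique_digit; infer_instance
def pvWitness_unique_digit : Int := 7

def Spec_unique_digit (n : Int) (out : Int) : Prop := out = unique_digit_alt n
instance (n : Int) (out : Int) : Decidable (Spec_unique_digit n out) := by unfold Spec_unique_digit; infer_instance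

-- ===== CLAIM (what is proved, stated in full; the proofs are below) =====
def Claim_equal_unique_digit : Prop := ∀ (n : Int), Dom_unique_digit n → Pre_unique_digit n → Spec_unique_digit n (unique_digit n)

-- ===== LEMMAS AND PROOFS =====

-- membership in the collected set = A's has_digit, modulo the accumulator
theorem mem_collectDigits (n k : Int) (s : PySem.Set Int) :
    k ∈ collectDigits n s ↔ hasDigitA n k = true ∨ k ∈ s := by
  fun_induction collectDigits n s with
  | case1 n s h ih =>
      rw [ih]
      conv_rhs => rw [hasDigitA]
      rw [dif_pos h]
      by_cases hk : PySem.Int.mod n 10 = k <;>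
        simp [hk, PySem.Set.mem_add] <;> tauto
  | case2 n s h =>
      rw [hasDigitA]
      simp [h]

theorem nodup_collectDigits (n : Int) (s : PySem.Set Int) (hs : s.Nodup) :
    (collectDigits n s).Nodup := by
  fun_induction collectDigits n s with
  | case1 n s h ih => exact ih (PySem.Set.nodup_add _ _ hs)
  | case2 n s h => exact hs

theorem bound_collectDigits (n : Int) (s : PySem.Set Int)
    (hs : ∀ x ∈ s, 0 ≤ x ∧ x < 10) :
    ∀ x ∈ collectDigits n s, 0 ≤ x ∧ x < 10 := by
  fun_induction collectDigits n s with
  | case1 n s h ih =>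
      refine ih ?_
      intro x hx
      rcases (PySem.Set.mem_add s (PySem.Int.mod n 10) x).1 hx with hx' | hx'
      · exact hs x hx'
      · subst hx'
        exact ⟨PySem.Int.mod_nonneg n (by omega), PySem.Int.mod_lt n (by omega)⟩
  | case2 n s h => exact hs

-- counting fold = countP
theorem foldl_if_count (l : List Int) (p : Int → Bool) (u : Int) :
    l.foldl (fun u i => if p i then u + 1 else u) u = u + (l.countP p : Int) := by
  induction l generalizing u with
  | nil => simp
  | cons a t ih =>
      simp only [List.foldl_cons, List.countP_cons, ih]
      by_cases h : p a <;> simp [h] <;> ring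

theorem unique_digit_spec : Claim_equal_unique_digit := by
  intro n _ _
  unfold Spec_unique_digit unique_digit unique_digit_alt
  set S := collectDigits n PySem.Set.empty with hS
  have hnodup : S.Nodup := nodup_collectDigits n _ (by simp [PySem.Set.empty])
  have hbound : ∀ x ∈ S, 0 ≤ x ∧ x < 10 :=
    bound_collectDigits n _ (by simp [PySem.Set.empty])
  have hmem : ∀ k, hasDigitA n k = true ↔ k ∈ S := by
    intro k
    rw [hS, mem_collectDigits]
    simp [PySem.Set.empty]
  have hrange : PySem.List.pyRange 1 10 1 = [1, 2, 3, 4, 5, 6, 7, 8, 9] := by decide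
  rw [hrange, foldl_if_count]
  -- reduce B's side to a filter length
  have hdiff : PySem.Set.diff S (PySem.Set.ofList [(0 : Int)]) = S.filter (fun x => x ≠ 0) := by
    simp [PySem.Set.diff, PySem.Set.ofList, PySem.Set.contains]
  rw [hdiff]
  have hlen : PySem.Set.len (S.filter (fun x => x ≠ 0)) = ((S.filter (fun x => x ≠ 0)).length : Int) := by
    simp [PySem.Set.len]
  rw [hlen]
  -- both sides are lengths of nodup filters with the same membership
  have hperm : ([1, 2, 3, 4, 5, 6, 7, 8, 9] : List Int).filter (fun k => hasDigitA n k) |>.Perm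
      (S.filter (fun x => x ≠ 0)) := by
    rw [List.perm_ext_iff_of_nodup]
    · intro a
      simp only [List.mem_filter]
      constructor
      · rintro ⟨ha, hd⟩
        refine ⟨(hmem a).1 hd, ?_⟩
        simp only [decide_eq_true_eq] at *
        fin_cases ha <;> simp
      · rintro ⟨ha, hz⟩
        obtain ⟨hb1, hb2⟩ := hbound a ha
        refine ⟨?_, (hmem a).2 ha⟩
        simp only [decide_eq_true_eq] at hz ⊢
        interval_cases a <;> simp_all
    · exact List.Nodup.filter _ (by decide)
    · exact List.Nodup.filter _ hnodup
  have hlen2 : (List.filter (hasDigitA n) [1, 2, 3, 4, 5, 6, 7, 8, 9]).length =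
      (List.filter (fun x => decide (x ≠ 0)) S).length := hperm.length_eq
  rw [zero_add, List.countP_eq_length_filter, hlen2]
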